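-- pv_equiv track=rewrite | github.com/tender-tales/platform | tender_tales/mcp_server/tools.py | _determine_zoom_level
-- ===== SOURCE A (Python) =====
-- def _determine_zoom_level(place_types: list[str]) -> int:
--     """Determine appropriate zoom level based on place types."""
--     # Mapping of place types to zoom levels (higher zoom = more specific)
--     zoom_mappings = [
--         (["street_address", "premise", "point_of_interest"], 15),
--         (["neighborhood", "sublocality"], 13),
--         (["locality", "administrative_area_level_3"], 11),
--         (["administrative_area_level_2", "administrative_area_level_1"], 9),
--         (["natural_feature", "park"], 8),
--         (["country"], 6),
--     ]
--
--     for type_list, zoom in zoom_mappings: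
--         if any(t in place_types for t in type_list):
--             return zoom
--
--     return 10  # Default city-level zoom
-- ===== SOURCE B (Python) =====
-- _ZOOM_TABLE = {
--     "street_address": (0, 15),
--     "premise": (0, 15),
--     "point_of_interest": (0, 15),
--     "neighborhood": (1, 13),
--     "sublocality": (1, 13),
--     "locality": (2, 11),
--     "administrative_area_level_3": (2, 11),
--     "administrative_area_level_2": (3, 9),
--     "administrative_area_level_1": (3, 9),
--     "natural_feature": (4, 8),
--     "park": (4, 8),
--     "country": (5, 6),
-- }
--
--
-- def _determine_zoom_level(place_types: list[str]) -> int: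
--     """Determine appropriate zoom level based on place types."""
--     best = None  # (rank, zoom) of the highest-priority match seen so far
--     for t in place_types:
--         entry = _ZOOM_TABLE.get(t)
--         if entry is not None and (best is None or entry[0] < best[0]):
--             best = entry
--     return best[1] if best is not None else 10
-- ===== Notes on version B (the rewrite author's own statement) =====
-- stated objective: idiomatic
-- what changed: Replaces the scan over six mapping groups with membership tests over the whole input by a single pass over the input that looks each type up in a flat type->(rank,zoom) dict and keeps the smallest-rank match, falling back to 10.
import Mathlib
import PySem

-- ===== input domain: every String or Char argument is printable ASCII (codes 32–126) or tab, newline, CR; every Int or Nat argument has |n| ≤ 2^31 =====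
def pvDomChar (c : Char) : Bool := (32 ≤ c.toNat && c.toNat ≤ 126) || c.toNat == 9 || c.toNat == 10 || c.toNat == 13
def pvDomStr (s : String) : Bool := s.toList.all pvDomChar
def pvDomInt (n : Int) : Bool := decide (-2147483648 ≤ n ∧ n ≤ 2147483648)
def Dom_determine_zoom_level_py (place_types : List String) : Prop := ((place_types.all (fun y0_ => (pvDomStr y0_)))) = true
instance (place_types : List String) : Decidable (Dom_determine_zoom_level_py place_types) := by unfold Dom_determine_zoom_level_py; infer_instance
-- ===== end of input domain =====

-- B replaces the ordered scan over six mapping groups by a single pass over the input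
-- keeping the smallest-rank dict match (idiomatic; same exact return value).


-- ===== PORT A =====
def pvMappings : List (List String × Int) :=
  [(["street_address", "premise", "point_of_interest"], 15),
   (["neighborhood", "sublocality"], 13),
   (["locality", "administrative_area_level_3"], 11),
   (["administrative_area_level_2", "administrative_area_level_1"], 9),
   (["natural_feature", "park"], 8),
   (["country"], 6)]

-- the for-loop with early return, as structural recursion over the mapping list
def pvLoopA (ms : List (List String × Int)) (place_types : List String) : Int :=
  match ms with
  | [] => 10
  | (type_list, zoom) :: rest =>
      if type_list.any (fun t => place_types.contains t) then zoom
      else pvLoopA rest place_types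

def determine_zoom_level_py (place_types : List String) : Int :=
  pvLoopA pvMappings place_types

-- ===== PORT B =====
def pvTable : List (String × Int × Int) :=
  [("street_address", (0, 15)), ("premise", (0, 15)), ("point_of_interest", (0, 15)),
   ("neighborhood", (1, 13)), ("sublocality", (1, 13)),
   ("locality", (2, 11)), ("administrative_area_level_3", (2, 11)),
   ("administrative_area_level_2", (3, 9)), ("administrative_area_level_1", (3, 9)),
   ("natural_feature", (4, 8)), ("park", (4, 8)), ("country", (5, 6))]

-- one iteration of B's loop: look the type up, keep it if it beats the current best rank
def pvStep (best : Option (Int × Int)) (t : String) : Option (Int × Int) :=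
  match pvTable.lookup t with
  | none => best
  | some entry =>
      match best with
      | none => some entry
      | some b => if entry.1 < b.1 then some entry else some b

def determine_zoom_level_py_alt (place_types : List String) : Int :=
  match place_types.foldl pvStep none with
  | some b => b.2
  | none => 10

-- ===== PRECONDITION & SPEC =====
def Spec_determine_zoom_level_py (place_types : List String) (out : Int) : Prop := out = determine_zoom_level_py_alt place_types
instance (place_types : List String) (out : Int) : Decidable (Spec_determine_zoom_level_py place_types out) := by unfold Spec_determine_zoom_level_py; infer_instance

-- ===== CLAIM (what is proved, stated in full; the proofs are below) =====
def Claim_equal_determine_zoom_level_py : Prop := ∀ (place_types : List String), Dom_determine_zoom_level_py place_types → Spec_determine_zoom_level_py place_types (determine_zoom_level_py place_types)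

-- ===== LEMMAS AND PROOFS =====

-- common characterisation: the best (rank, zoom) entry as a function of group membership
def pvSpec (ts : List String) : Option (Int × Int) :=
  if ts.contains "street_address" || ts.contains "premise" || ts.contains "point_of_interest" then some (0, 15)
  else if ts.contains "neighborhood" || ts.contains "sublocality" then some (1, 13)
  else if ts.contains "locality" || ts.contains "administrative_area_level_3" then some (2, 11)
  else if ts.contains "administrative_area_level_2" || ts.contains "administrative_area_level_1" then some (3, 9)
  else if ts.contains "natural_feature" || ts.contains "park" then some (4, 8)
  else if ts.contains "country" then some (5, 6)
  else none

def pvMerge (a b : Option (Int × Int)) : Option (Int × Int) :=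
  match a, b with
  | none, b => b
  | a, none => a
  | some x, some y => if y.1 < x.1 then some y else some x

theorem pvStep_eq (best : Option (Int × Int)) (t : String) :
    pvStep best t = pvMerge best (pvTable.lookup t) := by
  cases h : pvTable.lookup t <;> cases best <;> simp [pvStep, pvMerge, h]

theorem pvMerge_none (a : Option (Int × Int)) : pvMerge a none = a := by
  cases a <;> rfl

theorem pvMerge_assoc (a b c : Option (Int × Int)) :
    pvMerge (pvMerge a b) c = pvMerge a (pvMerge b c) := by
  rcases a with _ | ⟨ra, za⟩ <;> rcases b with _ | ⟨rb, zb⟩ <;> rcases c with _ | ⟨rc, zc⟩ <;>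
    first
      | rfl
      | (rw [pvMerge_none, pvMerge_none])
      | (by_cases h1 : rb < ra <;> by_cases h2 : rc < rb <;> by_cases h3 : rc < ra <;>
          simp [pvMerge, h1, h2, h3] <;> omega)

theorem pvFold_merge (ts : List String) (acc : Option (Int × Int)) :
    ts.foldl pvStep acc = pvMerge acc (ts.foldl pvStep none) := by
  induction ts generalizing acc with
  | nil => cases acc <;> rfl
  | cons t ts ih =>
      simp only [List.foldl_cons]
      rw [ih (pvStep acc t), ih (pvStep none t), pvStep_eq acc t, pvStep_eq none t,
        pvMerge_assoc]
      rfl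

theorem pvSpec_cons (t : String) (ts : List String) :
    pvSpec (t :: ts) = pvMerge (pvTable.lookup t) (pvSpec ts) := by
  by_cases h1 : t = "street_address"
  · subst h1; simp [pvSpec, pvTable, pvMerge]; split_ifs <;> simp_all
  by_cases h2 : t = "premise"
  · subst h2; simp [pvSpec, pvTable, pvMerge, List.lookup]; split_ifs <;> simp_all
  by_cases h3 : t = "point_of_interest"
  · subst h3; simp [pvSpec, pvTable, pvMerge, List.lookup]; split_ifs <;> simp_all
  by_cases h4 : t = "neighborhood"
  · subst h4; simp [pvSpec, pvTable, pvMerge, List.lookup]; split_ifs <;> simp_all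
  by_cases h5 : t = "sublocality"
  · subst h5; simp [pvSpec, pvTable, pvMerge, List.lookup]; split_ifs <;> simp_all
  by_cases h6 : t = "locality"
  · subst h6; simp [pvSpec, pvTable, pvMerge, List.lookup]; split_ifs <;> simp_all
  by_cases h7 : t = "administrative_area_level_3"
  · subst h7; simp [pvSpec, pvTable, pvMerge, List.lookup]; split_ifs <;> simp_all
  by_cases h8 : t = "administrative_area_level_2"
  · subst h8; simp [pvSpec, pvTable, pvMerge, List.lookup]; split_ifs <;> simp_all
  by_cases h9 : t = "administrative_area_level_1"
  · subst h9; simp [pvSpec, pvTable, pvMerge, List.lookup]; split_ifs <;> simp_all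
  by_cases h10 : t = "natural_feature"
  · subst h10; simp [pvSpec, pvTable, pvMerge, List.lookup]; split_ifs <;> simp_all
  by_cases h11 : t = "park"
  · subst h11; simp [pvSpec, pvTable, pvMerge, List.lookup]; split_ifs <;> simp_all
  by_cases h12 : t = "country"
  · subst h12; simp [pvSpec, pvTable, pvMerge, List.lookup]; split_ifs <;> simp_all
  have hb1 : (t == "street_address") = false := beq_eq_false_iff_ne.mpr h1
  have hb2 : (t == "premise") = false := beq_eq_false_iff_ne.mpr h2
  have hb3 : (t == "point_of_interest") = false := beq_eq_false_iff_ne.mpr h3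
  have hb4 : (t == "neighborhood") = false := beq_eq_false_iff_ne.mpr h4
  have hb5 : (t == "sublocality") = false := beq_eq_false_iff_ne.mpr h5
  have hb6 : (t == "locality") = false := beq_eq_false_iff_ne.mpr h6
  have hb7 : (t == "administrative_area_level_3") = false := beq_eq_false_iff_ne.mpr h7
  have hb8 : (t == "administrative_area_level_2") = false := beq_eq_false_iff_ne.mpr h8
  have hb9 : (t == "administrative_area_level_1") = false := beq_eq_false_iff_ne.mpr h9
  have hb10 : (t == "natural_feature") = false := beq_eq_false_iff_ne.mpr h10
  have hb11 : (t == "park") = false := beq_eq_false_iff_ne.mpr h11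
  have hb12 : (t == "country") = false := beq_eq_false_iff_ne.mpr h12
  have hl : pvTable.lookup t = none := by simp [pvTable, List.lookup, hb1, hb2, hb3, hb4, hb5, hb6, hb7, hb8, hb9, hb10, hb11, hb12]
  simp [pvSpec, pvMerge, hl, Ne.symm h1, Ne.symm h2, Ne.symm h3, Ne.symm h4, Ne.symm h5, Ne.symm h6, Ne.symm h7, Ne.symm h8, Ne.symm h9, Ne.symm h10, Ne.symm h11, Ne.symm h12]

theorem pvFold_char (ts : List String) : ts.foldl pvStep none = pvSpec ts := by
  induction ts with
  | nil => simp [pvSpec]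
  | cons t ts ih =>
      rw [List.foldl_cons, pvFold_merge, ih, pvStep_eq, pvSpec_cons]
      rfl

theorem pvA_char (ts : List String) :
    determine_zoom_level_py ts =
      (match pvSpec ts with | some b => b.2 | none => 10) := by
  simp only [determine_zoom_level_py, pvMappings, pvLoopA, pvSpec,
    List.any_cons, List.any_nil, Bool.or_false]
  split_ifs <;> first | rfl | simp_all

-- ===== VERDICT (by name: the statement is the Claim_ definition above) =====
theorem determine_zoom_level_py_spec : Claim_equal_determine_zoom_level_py := by
  intro ts _
  unfold Spec_determine_zoom_level_py determine_zoom_level_py_alt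
  rw [pvFold_char, pvA_char]
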